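-- pv_equiv track=rewrite | github.com/D4De/cnn-error-classifier | src/aggregators.py | experiment_counts
-- ===== SOURCE A (Python) =====
-- from collections import defaultdict
-- from typing import Callable, Dict, Iterable, List, Tuple, TypeVar, Union
--
-- def experiment_counts(metadata_list : List[dict]) -> Union[Tuple[int, Dict[str, int]], Tuple[None, None]]:
--     counts = defaultdict(int)
--     total_count = 0
--     for metadata in metadata_list:
--         if "experiment_counts" not in metadata:
--             return None, None
--         batch_counts = metadata["experiment_counts"]
--         for type, exps in batch_counts.items():
--             counts[type] += exps
--             total_count += exps
--     return total_count, counts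
-- ===== SOURCE B (Python) =====
-- def experiment_counts(metadata_list):
--     # pass 1: validation — every metadata dict must carry "experiment_counts"
--     if any("experiment_counts" not in m for m in metadata_list):
--         return None, None
--     # pass 2: aggregation over the flattened (type, exps) items
--     items = [p for m in metadata_list for p in m["experiment_counts"].items()]
--     counts = {}
--     for t, e in items:
--         counts[t] = counts.get(t, 0) + e
--     total = sum(e for _, e in items)
--     return total, counts
-- ===== Notes on version B (the rewrite author's own statement) =====
-- stated objective: alternative
-- what changed: Replaces A's single interleaved loop with early return by a validate-then-aggregate decomposition: a first pass checks all dicts for 'experiment_counts', then the (type, exps) items are flattened once and a plain dict of counts plus a separate sum over the flattened values are computed.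
import Mathlib
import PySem

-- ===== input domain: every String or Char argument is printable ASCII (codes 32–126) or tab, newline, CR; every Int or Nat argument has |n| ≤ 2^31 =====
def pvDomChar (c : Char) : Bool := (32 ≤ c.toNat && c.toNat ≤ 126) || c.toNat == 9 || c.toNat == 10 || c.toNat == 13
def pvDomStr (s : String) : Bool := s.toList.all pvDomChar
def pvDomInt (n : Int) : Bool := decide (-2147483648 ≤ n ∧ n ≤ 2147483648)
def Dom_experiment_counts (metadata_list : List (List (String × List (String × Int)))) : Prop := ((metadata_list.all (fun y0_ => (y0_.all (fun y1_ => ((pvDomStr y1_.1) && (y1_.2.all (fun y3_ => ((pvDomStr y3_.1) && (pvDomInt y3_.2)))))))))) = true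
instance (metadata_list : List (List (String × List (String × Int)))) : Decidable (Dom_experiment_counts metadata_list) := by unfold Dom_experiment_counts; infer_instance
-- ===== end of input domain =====

-- B replaces A's single interleaved loop (with early return) by a validate-then-aggregate
-- two-pass decomposition over the flattened items; same outputs, same cost (objective: alternative).


-- ===== PORT A =====
-- A's loop over metadata_list carrying (counts, total_count), with early return (none, none)
def ecGoA (ms : List (List (String × List (String × Int))))
    (counts : PySem.Dict String Int) (total : Int) :
    Option Int × (Option (List (String × Int))) :=
  match ms with
  | [] => (some total, some counts.items)
  | m :: rest =>
    let md := PySem.Dict.mk m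
    if md.contains "experiment_counts" then
      let bc := (md.get? "experiment_counts").getD []
      let st := bc.foldl
        (fun (st : PySem.Dict String Int × Int) p =>
          (st.1.modify p.1 0 (· + p.2), st.2 + p.2)) (counts, total)
      ecGoA rest st.1 st.2
    else (none, none)

def experiment_counts (metadata_list : List (List (String × List (String × Int)))) : Option Int × (Option (List (String × Int))) :=
  ecGoA metadata_list PySem.Dict.empty 0

-- ===== PORT B =====
def experiment_counts_alt (metadata_list : List (List (String × List (String × Int)))) : Option Int × (Option (List (String × Int))) :=
  -- pass 1: validation
  if metadata_list.any (fun m => !(PySem.Dict.mk m).contains "experiment_counts") then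
    (none, none)
  else
    -- pass 2: aggregation over the flattened items
    let items := metadata_list.flatMap
      (fun m => ((PySem.Dict.mk m).get? "experiment_counts").getD [])
    let counts := items.foldl
      (fun (c : PySem.Dict String Int) p => c.modify p.1 0 (· + p.2)) PySem.Dict.empty
    let total := (items.map (·.2)).sum
    (some total, some counts.items)

-- ===== PRECONDITION & SPEC =====
def Spec_experiment_counts (metadata_list : List (List (String × List (String × Int)))) (out : Option Int × (Option (List (String × Int)))) : Prop := out = experiment_counts_alt metadata_list
instance (metadata_list : List (List (String × List (String × Int)))) (out : Option Int × (Option (List (String × Int)))) : Decidable (Spec_experiment_counts metadata_list out) := by unfold Spec_experiment_counts; infer_instance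

-- ===== CLAIM (what is proved, stated in full; the proofs are below) =====
def Claim_equal_experiment_counts : Prop := ∀ (metadata_list : List (List (String × List (String × Int)))), Dom_experiment_counts metadata_list → Spec_experiment_counts metadata_list (experiment_counts metadata_list)

-- ===== LEMMAS AND PROOFS =====

-- A's inner fused fold splits into the counts fold and the sum of the values
theorem ecInner_split (bc : List (String × Int)) (c : PySem.Dict String Int) (t : Int) :
    bc.foldl (fun (st : PySem.Dict String Int × Int) p =>
        (st.1.modify p.1 0 (· + p.2), st.2 + p.2)) (c, t)
      = (bc.foldl (fun (c : PySem.Dict String Int) p => c.modify p.1 0 (· + p.2)) c,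
         t + (bc.map (·.2)).sum) := by
  induction bc generalizing c t with
  | nil => simp
  | cons p rest ih => simp [List.foldl, ih]; ring

-- characterisation of A's loop in terms of B's two passes
theorem ecGoA_spec (ms : List (List (String × List (String × Int))))
    (c : PySem.Dict String Int) (t : Int) :
    ecGoA ms c t
      = if ms.any (fun m => !(PySem.Dict.mk m).contains "experiment_counts") then
          (none, none)
        else
          let items := ms.flatMap (fun m => ((PySem.Dict.mk m).get? "experiment_counts").getD [])
          (some (t + (items.map (·.2)).sum),
           some ((items.foldl (fun (c : PySem.Dict String Int) p => c.modify p.1 0 (· + p.2)) c)).items) := by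
  induction ms generalizing c t with
  | nil => simp [ecGoA]
  | cons m rest ih =>
    by_cases h : (PySem.Dict.mk m).contains "experiment_counts"
    · simp only [ecGoA, h, if_true, ecInner_split, ih, List.any_cons, List.flatMap_cons,
        Bool.not_true, Bool.false_or]
      split
      · rfl
      · simp [List.foldl_append]; ring
    · have h' : (!(PySem.Dict.mk m).contains "experiment_counts") = true := by simp [h]
      simp only [ecGoA, if_neg h, List.any_cons, h', Bool.true_or, if_true]

-- ===== VERDICT (by name: the statement is the Claim_ definition above) =====
theorem experiment_counts_spec : Claim_equal_experiment_counts := by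
  intro ml _
  show experiment_counts ml = experiment_counts_alt ml
  simp only [experiment_counts, experiment_counts_alt, ecGoA_spec]
  split <;> simp
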